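-- pv_equiv track=rewrite | github.com/THESPRYGUY/Project_agent_NEO | src/neo_agent/writer.py | normalise_pii_flags
-- ===== SOURCE A (Python) =====
-- from typing import Iterable, List
--
-- _PII_MAP = {
--     "hash": "hash",
--     "hashed": "hash",
--     "hash_only": "hash",
--     "hashing": "hash",
--     "mask": "mask",
--     "masked": "mask",
--     "mask_only": "mask",
--     "masking": "mask",
--     "none": "none",
--     "no": "none",
--     "unset": "none",
--     "n/a": "none",
-- }
--
-- _VALID_PII = {"hash", "mask", "none"}
--
-- def normalise_pii_flags(flags: Iterable[str | None]) -> List[str]: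
--     """Normalise PII flags to canonical ``hash``/``mask``/``none`` values.
--
--     Unknown or custom values are coerced to ``mask`` to ensure safest handling.
--     Duplicate flags preserve first-seen order, and ``none`` is dropped when other
--     flags are present.
--     """
--
--     seen: set[str] = set()
--     result: List[str] = []
--
--     for flag in flags or []:
--         token = str(flag or "").strip().lower()
--         if not token:
--             continue
--         token = _PII_MAP.get(token, token)
--         if token not in _VALID_PII:
--             token = "mask"
--         if token == "none" and seen:
--             continue
--         if token != "none" and "none" in seen:
--             seen.remove("none")
--             result = [item for item in result if item != "none"]
--         if token not in seen:
--             seen.add(token)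
--             result.append(token)
--
--     if not result:
--         result = ["none"]
--     return result
-- ===== SOURCE B (Python) =====
-- from typing import Iterable, List
--
-- _PII_MAP = {
--     "hash": "hash",
--     "hashed": "hash",
--     "hash_only": "hash",
--     "hashing": "hash",
--     "mask": "mask",
--     "masked": "mask",
--     "mask_only": "mask",
--     "masking": "mask",
--     "none": "none",
--     "no": "none",
--     "unset": "none",
--     "n/a": "none",
-- }
--
-- _VALID_PII = {"hash", "mask", "none"}
--
--
-- def normalise_pii_flags(flags: Iterable[str | None]) -> List[str]:
--     """Two passes: normalise+dedup (keeping 'none'), then one final filter pass."""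
--     seen: set[str] = set()
--     out: List[str] = []
--     for flag in flags or []:
--         token = str(flag or "").strip().lower()
--         if not token:
--             continue
--         token = _PII_MAP.get(token, token)
--         if token not in _VALID_PII:
--             token = "mask"
--         if token not in seen:
--             seen.add(token)
--             out.append(token)
--     if any(t != "none" for t in out):
--         out = [t for t in out if t != "none"]
--     return out or ["none"]
-- ===== Notes on version B (the rewrite author's own statement) =====
-- stated objective: simpler
-- what changed: B drops A's in-loop 'none' bookkeeping (the seen-nonempty skip and the mid-loop removal of 'none' from seen plus rebuild of result) and instead dedups all normalised tokens in first-seen order, then filters out 'none' in one final pass when any other flag is present.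
import Mathlib
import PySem

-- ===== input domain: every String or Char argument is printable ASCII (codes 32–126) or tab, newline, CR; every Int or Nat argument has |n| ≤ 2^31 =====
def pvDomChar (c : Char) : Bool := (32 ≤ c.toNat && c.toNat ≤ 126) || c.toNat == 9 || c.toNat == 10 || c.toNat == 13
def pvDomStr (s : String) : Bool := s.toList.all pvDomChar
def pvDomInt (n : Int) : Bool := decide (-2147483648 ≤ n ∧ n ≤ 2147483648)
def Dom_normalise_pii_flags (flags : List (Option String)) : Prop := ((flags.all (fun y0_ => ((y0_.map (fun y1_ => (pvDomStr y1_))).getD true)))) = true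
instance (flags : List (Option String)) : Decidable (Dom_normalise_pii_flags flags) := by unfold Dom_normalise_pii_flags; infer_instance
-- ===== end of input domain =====

-- B replaces A's in-loop 'none' removal/skip bookkeeping by a plain ordered dedup
-- followed by one final filter pass; objective: simpler.

-- ===== PORT A =====
def pvPiiMap : PySem.Dict String String := PySem.Dict.ofList
  [("hash","hash"),("hashed","hash"),("hash_only","hash"),("hashing","hash"),
   ("mask","mask"),("masked","mask"),("mask_only","mask"),("masking","mask"),
   ("none","none"),("no","none"),("unset","none"),("n/a","none")]

def pvValidPii : PySem.Set String := PySem.Set.ofList ["hash","mask","none"]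

def pvStepA (st : PySem.Set String × List String) (flag : Option String) :
    PySem.Set String × List String :=
  let seen := st.1
  let result := st.2
  let token := PySem.Str.lower (PySem.Str.strip (flag.getD ""))
  if token = "" then (seen, result)
  else
    let token := PySem.Dict.getD pvPiiMap token token
    let token := if PySem.Set.contains pvValidPii token then token else "mask"
    if token = "none" ∧ seen ≠ [] then (seen, result)
    else
      -- Python's seen.remove("none") is guarded by '"none" in seen', so discard is exact here
      let sr := if token ≠ "none" ∧ PySem.Set.contains seen "none" = true
                then (PySem.Set.discard seen "none", result.filter (fun item => item ≠ "none"))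
                else (seen, result)
      if PySem.Set.contains sr.1 token then sr
      else (PySem.Set.add sr.1 token, sr.2 ++ [token])

def normalise_pii_flags (flags : List (Option String)) : List String :=
  let st := flags.foldl pvStepA (PySem.Set.empty, [])
  if st.2 = [] then ["none"] else st.2

-- ===== PORT B =====
def pvStepB (st : PySem.Set String × List String) (flag : Option String) :
    PySem.Set String × List String :=
  let token := PySem.Str.lower (PySem.Str.strip (flag.getD ""))
  if token = "" then st
  else
    let token := PySem.Dict.getD pvPiiMap token token
    let token := if PySem.Set.contains pvValidPii token then token else "mask"
    if PySem.Set.contains st.1 token then st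
    else (PySem.Set.add st.1 token, st.2 ++ [token])

def normalise_pii_flags_alt (flags : List (Option String)) : List String :=
  let st := flags.foldl pvStepB (PySem.Set.empty, [])
  let out := if st.2.any (fun t => t ≠ "none") then st.2.filter (fun t => t ≠ "none") else st.2
  if out = [] then ["none"] else out

-- ===== PRECONDITION & SPEC =====
def Spec_normalise_pii_flags (flags : List (Option String)) (out : List String) : Prop := out = normalise_pii_flags_alt flags
instance (flags : List (Option String)) (out : List String) : Decidable (Spec_normalise_pii_flags flags out) := by unfold Spec_normalise_pii_flags; infer_instance

-- ===== CLAIM (what is proved, stated in full; the proofs are below) =====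
def Claim_equal_normalise_pii_flags : Prop := ∀ (flags : List (Option String)), Dom_normalise_pii_flags flags → Spec_normalise_pii_flags flags (normalise_pii_flags flags)

-- ===== LEMMAS AND PROOFS =====

-- the normalised token of one flag ("" = skipped empty token)
def pvTok (flag : Option String) : String :=
  let token := PySem.Str.lower (PySem.Str.strip (flag.getD ""))
  if token = "" then ""
  else
    let token := PySem.Dict.getD pvPiiMap token token
    if PySem.Set.contains pvValidPii token then token else "mask"

-- B's final filter pass
def pvF (S : List String) : List String :=
  if S.any (fun t => t ≠ "none") then S.filter (fun t => t ≠ "none") else S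

-- the ordered dedup both loops perform on the token stream
def pvUpd (ts : List String) (L : PySem.Set String) : PySem.Set String :=
  ts.foldl (fun S t => if t = "" then S else PySem.Set.add S t) L

-- A's loop body, expressed on the normalised token
def pvStepA' (st : PySem.Set String × List String) (t : String) :
    PySem.Set String × List String :=
  let seen := st.1
  let result := st.2
  if t = "" then (seen, result)
  else if t = "none" ∧ seen ≠ [] then (seen, result)
  else
    let sr := if t ≠ "none" ∧ PySem.Set.contains seen "none" = true
              then (PySem.Set.discard seen "none", result.filter (fun item => item ≠ "none"))
              else (seen, result)
    if PySem.Set.contains sr.1 t then sr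
    else (PySem.Set.add sr.1 t, sr.2 ++ [t])

-- B's loop body, expressed on the normalised token
def pvStepB' (st : PySem.Set String × List String) (t : String) :
    PySem.Set String × List String :=
  if t = "" then st
  else if PySem.Set.contains st.1 t then st
  else (PySem.Set.add st.1 t, st.2 ++ [t])

theorem pvCoerce_ne (s : String) :
    (if PySem.Set.contains pvValidPii (PySem.Dict.getD pvPiiMap s s) = true
     then PySem.Dict.getD pvPiiMap s s else "mask") ≠ "" := by
  by_cases hc : PySem.Set.contains pvValidPii (PySem.Dict.getD pvPiiMap s s) = true
  · rw [if_pos hc]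
    have hmem : PySem.Dict.getD pvPiiMap s s ∈ pvValidPii := by
      simpa [PySem.Set.contains, List.contains_iff_mem] using hc
    intro he
    rw [he] at hmem
    exact absurd hmem (by decide)
  · rw [if_neg hc]; decide

theorem pvStepA_tok (st : PySem.Set String × List String) (flag : Option String) :
    pvStepA st flag = pvStepA' st (pvTok flag) := by
  unfold pvStepA pvStepA' pvTok
  by_cases h0 : PySem.Str.lower (PySem.Str.strip (flag.getD "")) = ""
  · simp [h0]
  · have hc := pvCoerce_ne (PySem.Str.lower (PySem.Str.strip (flag.getD "")))
    simp only [h0, if_false, if_neg hc]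

theorem pvStepB_tok (st : PySem.Set String × List String) (flag : Option String) :
    pvStepB st flag = pvStepB' st (pvTok flag) := by
  unfold pvStepB pvStepB' pvTok
  by_cases h0 : PySem.Str.lower (PySem.Str.strip (flag.getD "")) = ""
  · simp [h0]
  · have hc := pvCoerce_ne (PySem.Str.lower (PySem.Str.strip (flag.getD "")))
    simp only [h0, if_false, if_neg hc]

theorem pvF_nil : pvF [] = [] := by simp [pvF]

theorem pvF_eq_nil_iff (S : List String) : pvF S = [] ↔ S = [] := by
  unfold pvF
  by_cases h : S.any (fun t => t ≠ "none") = true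
  · simp only [h, if_true]
    constructor
    · intro hf
      by_contra hS
      rcases List.any_eq_true.mp h with ⟨x, hx, hxne⟩
      have hmem : x ∈ S.filter (fun t => t ≠ "none") := by
        simp only [List.mem_filter]
        exact ⟨hx, hxne⟩
      rw [hf] at hmem
      exact absurd hmem (List.not_mem_nil)
    · intro hS; subst hS; rfl
  · rw [if_neg h]

theorem pvAdd_of_mem (L : PySem.Set String) (t : String) (h : t ∈ L) :
    PySem.Set.add L t = L := by
  simp [PySem.Set.add, PySem.Set.contains, h]

theorem pvAdd_of_not_mem (L : PySem.Set String) (t : String) (h : t ∉ L) :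
    PySem.Set.add L t = L ++ [t] := by
  simp [PySem.Set.add, PySem.Set.contains, h]

theorem pvStepA'_key (L : PySem.Set String) (hnd : L.Nodup) (t : String) (ht : t ≠ "") :
    pvStepA' (pvF L, pvF L) t = (pvF (PySem.Set.add L t), pvF (PySem.Set.add L t)) := by
  by_cases htn : t = "none"
  · subst htn
    by_cases hL : L = []
    · subst hL
      simp [pvStepA', pvF, PySem.Set.add, PySem.Set.contains]
    · have h1 : pvF L ≠ [] := by rw [ne_eq, pvF_eq_nil_iff]; exact hL
      have h2 : pvF (PySem.Set.add L "none") = pvF L := by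
        by_cases hm : "none" ∈ L
        · rw [pvAdd_of_mem L _ hm]
        · rw [pvAdd_of_not_mem L _ hm]
          have hany : L.any (fun x => x ≠ "none") = true := by
            rcases List.exists_mem_of_ne_nil L hL with ⟨x, hx⟩
            refine List.any_eq_true.mpr ⟨x, hx, ?_⟩
            simp only [ne_eq, decide_eq_true_eq]
            rintro rfl; exact hm hx
          have hany2 : (L ++ ["none"]).any (fun x => x ≠ "none") = true := by
            rcases List.any_eq_true.mp hany with ⟨x, hx, hxe⟩
            exact List.any_eq_true.mpr ⟨x, List.mem_append_left _ hx, hxe⟩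
          unfold pvF
          rw [if_pos hany2, if_pos hany, List.filter_append]
          simp
      simp [pvStepA', h1, h2]
  · by_cases hany : L.any (fun x => x ≠ "none") = true
    · have hFL : pvF L = L.filter (fun x => x ≠ "none") := by unfold pvF; rw [if_pos hany]
      have hnm : "none" ∉ pvF L := by rw [hFL]; simp [List.mem_filter]
      by_cases htL : t ∈ L
      · have htF : t ∈ pvF L := by
          rw [hFL]; simp only [List.mem_filter]
          exact ⟨htL, by simpa using htn⟩
        rw [pvAdd_of_mem L t htL]
        simp [pvStepA', ht, htn, hnm, htF]
      · have htF : t ∉ pvF L := fun h => htL (List.mem_of_mem_filter (hFL ▸ h))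
        rw [pvAdd_of_not_mem L t htL]
        have hany2 : (L ++ [t]).any (fun x => x ≠ "none") = true := by
          rcases List.any_eq_true.mp hany with ⟨x, hx, hxe⟩
          exact List.any_eq_true.mpr ⟨x, List.mem_append_left _ hx, hxe⟩
        have hres : pvF (L ++ [t]) = pvF L ++ [t] := by
          unfold pvF
          rw [if_pos hany2, if_pos hany, List.filter_append]
          simp [htn]
        rw [hres]
        simp [pvStepA', ht, htn, hnm, htF]
    · have hall : ∀ x ∈ L, x = "none" := by
        intro x hx
        by_contra hne
        exact hany (List.any_eq_true.mpr ⟨x, hx, by simpa using hne⟩)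
      cases L with
      | nil => simp [pvStepA', pvF, ht, htn, PySem.Set.add, PySem.Set.contains]
      | cons a as =>
        have ha : a = "none" := hall a (by simp)
        have has : as = [] := by
          cases as with
          | nil => rfl
          | cons b bs =>
            have hb : b = "none" := hall b (by simp)
            rw [List.nodup_cons] at hnd
            exact absurd (by rw [ha, hb]; exact List.mem_cons_self .. : a ∈ b :: bs) hnd.1
        subst ha has
        simp [pvStepA', pvF, ht, htn, PySem.Set.add, PySem.Set.contains, PySem.Set.discard]

theorem pvAdd_nodup (L : PySem.Set String) (t : String) (h : L.Nodup) :
    (PySem.Set.add L t).Nodup := by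
  by_cases hm : t ∈ L
  · rw [pvAdd_of_mem L t hm]; exact h
  · rw [pvAdd_of_not_mem L t hm]
    refine List.Nodup.append h (List.nodup_singleton t) ?_
    intro a ha hb
    rw [List.mem_singleton] at hb
    subst hb
    exact hm ha

theorem pvFoldA (ts : List String) : ∀ (L : PySem.Set String), L.Nodup →
    ts.foldl pvStepA' (pvF L, pvF L) = (pvF (pvUpd ts L), pvF (pvUpd ts L)) := by
  induction ts with
  | nil => intro L _; simp [pvUpd]
  | cons t ts ih =>
    intro L hnd
    by_cases h0 : t = ""
    · simp only [List.foldl_cons, pvStepA', h0, if_true, pvUpd, List.foldl_cons]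
      have := ih L hnd
      simpa [pvStepA', pvUpd] using this
    · simp only [List.foldl_cons, pvStepA'_key L hnd t h0]
      rw [ih (PySem.Set.add L t) (pvAdd_nodup L t hnd)]
      simp [pvUpd, h0]

theorem pvFoldB (ts : List String) : ∀ (L : PySem.Set String),
    ts.foldl pvStepB' (L, L) = (pvUpd ts L, pvUpd ts L) := by
  induction ts with
  | nil => intro L; simp [pvUpd]
  | cons t ts ih =>
    intro L
    by_cases h0 : t = ""
    · simp only [List.foldl_cons, pvStepB', h0, if_true, pvUpd, List.foldl_cons]
      have := ih L
      simpa [pvStepB', pvUpd] using this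
    · have hstep : pvStepB' (L, L) t = (PySem.Set.add L t, PySem.Set.add L t) := by
        by_cases hc : PySem.Set.contains L t = true
        · have hm : t ∈ L := by simpa [PySem.Set.contains, List.contains_iff_mem] using hc
          simp [pvStepB', h0, hm]
        · have hm : t ∉ L := by simpa [PySem.Set.contains, List.contains_iff_mem] using hc
          simp [pvStepB', h0, hm]
      simp only [List.foldl_cons, hstep]
      rw [ih (PySem.Set.add L t)]
      simp [pvUpd, h0]

-- ===== VERDICT (by name: the statement is the Claim_ definition above) =====
theorem normalise_pii_flags_spec : Claim_equal_normalise_pii_flags := by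
  intro flags _
  unfold Spec_normalise_pii_flags normalise_pii_flags normalise_pii_flags_alt
  have hA : pvStepA = (fun st flag => pvStepA' st (pvTok flag)) := by
    funext st flag; exact pvStepA_tok st flag
  have hB : pvStepB = (fun st flag => pvStepB' st (pvTok flag)) := by
    funext st flag; exact pvStepB_tok st flag
  have hinit : ((PySem.Set.empty : PySem.Set String), ([] : List String)) = (pvF [], pvF []) := by
    simp [PySem.Set.empty, pvF_nil]
  rw [hA, hB, hinit, ← List.foldl_map (f := pvTok) (g := pvStepA'), ← List.foldl_map (f := pvTok) (g := pvStepB'),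
    pvFoldA (flags.map pvTok) [] List.nodup_nil, pvF_nil, pvFoldB (flags.map pvTok) []]
  simp [pvF]
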